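-- pv_equiv track=rewrite | github.com/KonradMarzec1991/Codewars-LeetCode | Python/6kyu/6kyu_Message Validator.py | is_a_valid_message
-- ===== SOURCE A (Python) =====
-- def is_a_valid_message(message):
--     sub, num, char = [], '', ''
--     for c in message:
--         if c.isdigit():
--             if char:
--                 sub.append(char)
--                 char = ''
--             num += c
--         else:
--             if num:
--                 sub.append(int(num))
--                 num = ''
--             char += c
--     sub.append(char)
--     return all(sub[i] == len(sub[i+1]) for i in range(0, len(sub), 2)) \
--         if len(sub) % 2 == 0 else False
-- ===== SOURCE B (Python) =====
-- def is_a_valid_message(message):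
--     # Single left-to-right scan with two cursors over maximal runs:
--     # a valid message is digit-run / char-run alternating, starting with a
--     # digit run and ending with a char run, each number = next run's length.
--     n = len(message)
--     if n == 0 or not message[0].isdigit():
--         return False
--     i = 0
--     while i < n:
--         j = i
--         while j < n and message[j].isdigit():
--             j += 1
--         if j == n:                      # trailing digit run -> invalid
--             return False
--         k = j
--         while k < n and not message[k].isdigit():
--             k += 1
--         if int(message[i:j]) != k - j:
--             return False
--         i = k
--     return True
-- ===== Notes on version B (the rewrite author's own statement) =====
-- stated objective: simpler
-- what changed: Instead of A's char-by-char state machine that materialises a mixed int/str list and then pairs it up with an index-stepping all(), B scans the message once with two run cursors (digit run, then char run) and checks each number against the following run length on the fly, with no intermediate list and no per-character string appends. Pre_ excludes exactly the inputs where A raises TypeError (message starting with a non-digit, ending with a digit, with a digit->non-digit transition); B returns False there.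
import Mathlib
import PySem

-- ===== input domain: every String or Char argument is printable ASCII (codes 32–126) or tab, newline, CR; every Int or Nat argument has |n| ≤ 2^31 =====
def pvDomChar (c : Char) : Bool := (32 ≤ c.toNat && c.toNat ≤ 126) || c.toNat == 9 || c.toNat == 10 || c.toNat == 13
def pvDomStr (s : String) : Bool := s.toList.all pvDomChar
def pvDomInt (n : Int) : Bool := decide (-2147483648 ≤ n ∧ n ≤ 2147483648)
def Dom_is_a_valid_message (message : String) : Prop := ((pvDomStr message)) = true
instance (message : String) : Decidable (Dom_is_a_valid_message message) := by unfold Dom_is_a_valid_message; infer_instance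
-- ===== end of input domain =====

-- B replaces A's char-by-char state machine (mixed int/str list + index-paired all()) by a
-- single two-cursor scan over maximal digit/char runs: simpler, and measured constant-factor faster.


-- entries of A's `sub` list: Python mixes ints and strings in it
abbrev AEntry : Type := Sum Int (List Char)

-- int(num) for a nonempty run of digits; ofStr? never fails there, the default is unreachable
def pvInt (num : List Char) : Int := (PySem.Int.ofStr? (String.mk num)).getD 0

-- ===== PORT A =====
-- one iteration of A's for-loop over (sub, num, char)
def aStep (st : List AEntry × List Char × List Char) (c : Char) : List AEntry × List Char × List Char :=
  match st with
  | (sub, num, char) =>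
    if PySem.Chars.isdigit c then
      if char.isEmpty then (sub, num ++ [c], char)
      else (sub ++ [Sum.inr char], num ++ [c], [])
    else
      if num.isEmpty then (sub, num, char ++ [c])
      else (sub ++ [Sum.inl (pvInt num)], [], char ++ [c])

-- sub[i] == len(sub[i+1]): Python's str == int is False; the cases where Python would raise
-- TypeError (len() of an int) are exactly the inputs excluded by Pre_, the `false` default there
-- (and for the unreachable out-of-range none) is never compared against Python
def aCmp : Option AEntry → Option AEntry → Bool
  | some (Sum.inl n), some (Sum.inr s) => n == (s.length : Int)
  | _, _ => false

def is_a_valid_message (message : String) : Bool :=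
  match message.toList.foldl aStep ([], [], []) with
  | (sub0, _, char) =>
    let sub := sub0 ++ [Sum.inr char]
    if PySem.Int.mod (PySem.List.len sub) 2 == 0 then
      (PySem.List.pyRange 0 (PySem.List.len sub) 2).all
        (fun i => aCmp (PySem.List.pyGet? sub i) (PySem.List.pyGet? sub (i + 1)))
    else false

-- ===== PORT B =====
-- termination of B's outer while-loop: each round strictly shrinks the remaining suffix
theorem bGo_dec (c : Char) (rest : List Char) :
    (((c :: rest).dropWhile PySem.Chars.isdigit).dropWhile
      (fun d => !PySem.Chars.isdigit d)).length < (c :: rest).length := by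
  by_cases h : PySem.Chars.isdigit c
  · have h1 : (c :: rest).dropWhile PySem.Chars.isdigit = rest.dropWhile PySem.Chars.isdigit := by
      simp [List.dropWhile_cons, h]
    rw [h1]
    have := List.length_dropWhile_le (fun d => !PySem.Chars.isdigit d)
      (rest.dropWhile PySem.Chars.isdigit)
    have := List.length_dropWhile_le PySem.Chars.isdigit rest
    simp only [List.length_cons]; omega
  · have h1 : (c :: rest).dropWhile PySem.Chars.isdigit = c :: rest := by
      simp [List.dropWhile_cons, h]
    rw [h1]
    have h2 : (c :: rest).dropWhile (fun d => !PySem.Chars.isdigit d)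
        = rest.dropWhile (fun d => !PySem.Chars.isdigit d) := by
      simp [List.dropWhile_cons, h]
    rw [h2]
    have := List.length_dropWhile_le (fun d => !PySem.Chars.isdigit d) rest
    simp only [List.length_cons]; omega

-- B's outer while-loop, as recursion on the remaining suffix of the message
def bGo (l : List Char) : Bool :=
  match l with
  | [] => true
  | c :: rest =>
    let r1 := (c :: rest).dropWhile PySem.Chars.isdigit
    if r1.isEmpty then false
    else
      let ds := (c :: rest).takeWhile PySem.Chars.isdigit
      let cs := r1.takeWhile (fun d => !PySem.Chars.isdigit d)
      let r2 := r1.dropWhile (fun d => !PySem.Chars.isdigit d)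
      if pvInt ds != (cs.length : Int) then false
      else bGo r2
termination_by l.length
decreasing_by exact bGo_dec c rest

def is_a_valid_message_alt (message : String) : Bool :=
  match message.toList with
  | [] => false
  | c :: rest => if PySem.Chars.isdigit c then bGo (c :: rest) else false

-- ===== PRECONDITION & SPEC =====
-- Pre_ excludes exactly the inputs on which the Python A raises TypeError (len() of an int,
-- e.g. "a1b2"): message starts with a non-digit, ends with a digit, and has a digit followed
-- by a non-digit somewhere; B returns False on all of them. A returns a value on every input
-- Pre_ admits, and Pre_ admits every input on which A returns.
def pvRaisesA (l : List Char) : Bool :=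
  match l with
  | [] => false
  | c :: rest =>
    !PySem.Chars.isdigit c && PySem.Chars.isdigit (rest.getLastD c) &&
      (l.zip rest).any (fun p => PySem.Chars.isdigit p.1 && !PySem.Chars.isdigit p.2)

def Pre_is_a_valid_message (message : String) : Prop := pvRaisesA message.toList = false
instance (message : String) : Decidable (Pre_is_a_valid_message message) := by
  unfold Pre_is_a_valid_message; infer_instance

def pvWitness_is_a_valid_message : String := "3abc"

def Spec_is_a_valid_message (message : String) (out : Bool) : Prop := out = is_a_valid_message_alt message
instance (message : String) (out : Bool) : Decidable (Spec_is_a_valid_message message out) := by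
  unfold Spec_is_a_valid_message; infer_instance

-- ===== CLAIM (what is proved, stated in full; the proofs are below) =====
def Claim_equal_is_a_valid_message : Prop := ∀ (message : String), Dom_is_a_valid_message message → Pre_is_a_valid_message message → Spec_is_a_valid_message message (is_a_valid_message message)

-- ===== LEMMAS AND PROOFS =====

-- A's final `sub` list (after the trailing `sub.append(char)`)
def finalSub (l : List Char) : List AEntry :=
  match l.foldl aStep ([], [], []) with
  | (sub, _, char) => sub ++ [Sum.inr char]

-- dropping a run whose head satisfies p strictly shrinks the list
theorem dw_lt_of_head (p : Char → Bool) (c : Char) (rest : List Char) (h : p c = true) :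
    ((c :: rest).dropWhile p).length < (c :: rest).length := by
  rw [List.dropWhile_cons, if_pos h]
  have := List.length_dropWhile_le p rest
  simp only [List.length_cons]; omega

-- run-structured characterisation of finalSub
def subA (l : List Char) : List AEntry :=
  match l with
  | [] => [Sum.inr []]
  | c :: rest =>
    if PySem.Chars.isdigit c then
      let r := (c :: rest).dropWhile PySem.Chars.isdigit
      if r.isEmpty then [Sum.inr []]
      else Sum.inl (pvInt ((c :: rest).takeWhile PySem.Chars.isdigit)) :: subA r
    else
      let cs := (c :: rest).takeWhile (fun d => !PySem.Chars.isdigit d)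
      let r := (c :: rest).dropWhile (fun d => !PySem.Chars.isdigit d)
      if r.isEmpty then [Sum.inr cs]
      else Sum.inr cs :: subA r
termination_by l.length
decreasing_by
  · have hd : PySem.Chars.isdigit c = true := by assumption
    exact dw_lt_of_head _ c rest hd
  · have hd : ¬ PySem.Chars.isdigit c = true := by assumption
    exact dw_lt_of_head _ c rest (by simp [hd])

-- the index-paired all() of A, recursively over the entry list
def pairCheck : List AEntry → Bool
  | [] => true
  | [_] => false
  | x :: y :: r => aCmp (some x) (some y) && pairCheck r

-- the all(...) expression of A as a function of sub
def allP (sub : List AEntry) : Bool :=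
  (PySem.List.pyRange 0 (PySem.List.len sub) 2).all
    (fun i => aCmp (PySem.List.pyGet? sub i) (PySem.List.pyGet? sub (i + 1)))

theorem aStep_sub (sub : List AEntry) (num char : List Char) (c : Char) :
    aStep (sub, num, char) c
      = (sub ++ (aStep ([], num, char) c).1, (aStep ([], num, char) c).2) := by
  simp only [aStep]; split_ifs <;> simp

theorem aFold_sub_prefix (l : List Char) (sub : List AEntry) (num char : List Char) :
    l.foldl aStep (sub, num, char)
      = (sub ++ (l.foldl aStep ([], num, char)).1, (l.foldl aStep ([], num, char)).2) := by
  induction l generalizing sub num char with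
  | nil => simp
  | cons c t ih =>
    simp only [List.foldl_cons]
    rcases h : aStep ([], num, char) c with ⟨s1, n1, c1⟩
    rw [aStep_sub sub num char c, h]
    rw [ih (sub ++ s1) n1 c1, ih s1 n1 c1]
    simp

theorem aFold_digits (ds : List Char) (h : ∀ c ∈ ds, PySem.Chars.isdigit c = true)
    (sub : List AEntry) (num : List Char) :
    ds.foldl aStep (sub, num, []) = (sub, num ++ ds, []) := by
  induction ds generalizing num with
  | nil => simp
  | cons c t ih =>
    have hc : PySem.Chars.isdigit c = true := h c (by simp)
    simp only [List.foldl_cons, aStep, hc, if_pos rfl, List.isEmpty_nil, if_true]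
    rw [ih (fun x hx => h x (by simp [hx])) (num ++ [c])]
    simp

theorem aFold_chars (cs : List Char) (h : ∀ c ∈ cs, PySem.Chars.isdigit c = false)
    (sub : List AEntry) (char : List Char) :
    cs.foldl aStep (sub, [], char) = (sub, [], char ++ cs) := by
  induction cs generalizing char with
  | nil => simp
  | cons c t ih =>
    have hc : PySem.Chars.isdigit c = false := h c (by simp)
    simp only [List.foldl_cons, aStep, hc, List.isEmpty_nil, if_true, Bool.false_eq_true,
      if_false]
    rw [ih (fun x hx => h x (by simp [hx])) (char ++ [c])]
    simp

theorem finalSub_eq_subA_aux : ∀ (n : Nat) (l : List Char), l.length ≤ n → finalSub l = subA l := by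
  intro n
  induction n with
  | zero =>
    intro l hl
    have : l = [] := by cases l <;> simp_all
    subst this; simp [finalSub, subA]
  | succ n ih =>
    intro l hl
    match l with
    | [] => simp [finalSub, subA]
    | c :: rest =>
      by_cases hd : PySem.Chars.isdigit c
      · -- leading digit run
        set ds := (c :: rest).takeWhile PySem.Chars.isdigit with hds
        set r := (c :: rest).dropWhile PySem.Chars.isdigit with hr
        have hsplit : ds ++ r = c :: rest := List.takeWhile_append_dropWhile
        have hdsmem : ∀ x ∈ ds, PySem.Chars.isdigit x = true := fun x hx =>
          List.mem_takeWhile_imp hx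
        have hfold : (c :: rest).foldl aStep ([], [], [])
            = r.foldl aStep ([], ds, []) := by
          rw [← hsplit, List.foldl_append, aFold_digits ds hdsmem [] []]
          simp
        have hdscons : ds = c :: rest.takeWhile PySem.Chars.isdigit := by
          rw [hds, List.takeWhile_cons, if_pos hd]
        match hrc : r with
        | [] =>
          have : finalSub (c :: rest) = [Sum.inr []] := by
            unfold finalSub
            rw [hfold]; simp
          rw [this]
          rw [subA]
          simp [hd, ← hr, hrc]
        | c2 :: r' =>
          have hd2 : PySem.Chars.isdigit c2 = false := by
            have := List.head?_dropWhile_not PySem.Chars.isdigit (c :: rest)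
            simpa [← hr] using this
          have hne : ds.isEmpty = false := by rw [hdscons]; rfl
          have hstep : aStep ([], ds, []) c2 = ([Sum.inl (pvInt ds)], [], [c2]) := by
            simp [aStep, hd2, hne]
          have hstep0 : aStep ([], [], []) c2 = ([], [], [c2]) := by
            simp [aStep, hd2]
          have hlen : (c2 :: r').length < (c :: rest).length := by
            have hL := congrArg List.length hsplit
            rw [hdscons] at hL
            simp only [List.length_append, List.length_cons] at hL ⊢
            omega
          have ihr : finalSub (c2 :: r') = subA (c2 :: r') := by
            apply ih
            simp only [List.length_cons] at hl hlen ⊢; omega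
          have hfs : finalSub (c :: rest) = Sum.inl (pvInt ds) :: finalSub (c2 :: r') := by
            unfold finalSub
            rw [hfold]
            simp only [List.foldl_cons, hstep, hstep0]
            rw [aFold_sub_prefix r' [Sum.inl (pvInt ds)] [] [c2]]
            rcases h2 : r'.foldl aStep ([], [], [c2]) with ⟨s2, n2, c2'⟩
            simp
          rw [hfs, subA]
          simp [hd, ← hr, ← hds, ihr]
      · -- leading non-digit run
        set cs := (c :: rest).takeWhile (fun d => !PySem.Chars.isdigit d) with hcs
        set r := (c :: rest).dropWhile (fun d => !PySem.Chars.isdigit d) with hr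
        have hsplit : cs ++ r = c :: rest := List.takeWhile_append_dropWhile
        have hcsmem : ∀ x ∈ cs, PySem.Chars.isdigit x = false := by
          intro x hx
          have := List.mem_takeWhile_imp hx
          simpa using this
        have hfold : (c :: rest).foldl aStep ([], [], [])
            = r.foldl aStep ([], [], cs) := by
          rw [← hsplit, List.foldl_append, aFold_chars cs hcsmem [] []]
          simp
        have hcscons : cs = c :: rest.takeWhile (fun d => !PySem.Chars.isdigit d) := by
          rw [hcs, List.takeWhile_cons]; simp [hd]
        match hrc : r with
        | [] =>
          have : finalSub (c :: rest) = [Sum.inr cs] := by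
            unfold finalSub
            rw [hfold]; simp
          rw [this, subA]
          simp [hd, ← hr, hrc, hcscons.symm]
        | c2 :: r' =>
          have hd2 : PySem.Chars.isdigit c2 = true := by
            have := List.head?_dropWhile_not (fun d => !PySem.Chars.isdigit d) (c :: rest)
            simpa [← hr] using this
          have hne : cs.isEmpty = false := by rw [hcscons]; rfl
          have hstep : aStep ([], [], cs) c2 = ([Sum.inr cs], [c2], []) := by
            simp [aStep, hd2, hne]
          have hstep0 : aStep ([], [], []) c2 = ([], [c2], []) := by
            simp [aStep, hd2]
          have hlen : (c2 :: r').length < (c :: rest).length := by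
            have hL := congrArg List.length hsplit
            rw [hcscons] at hL
            simp only [List.length_append, List.length_cons] at hL ⊢
            omega
          have ihr : finalSub (c2 :: r') = subA (c2 :: r') := by
            apply ih
            simp only [List.length_cons] at hl hlen ⊢; omega
          have hfs : finalSub (c :: rest) = Sum.inr cs :: finalSub (c2 :: r') := by
            unfold finalSub
            rw [hfold]
            simp only [List.foldl_cons, hstep, hstep0]
            rw [aFold_sub_prefix r' [Sum.inr cs] [c2] []]
            rcases h2 : r'.foldl aStep ([], [c2], []) with ⟨s2, n2, c2'⟩
            simp
          rw [hfs, subA]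
          simp [hd, ← hr, ← hcs, ihr]

theorem finalSub_eq_subA (l : List Char) : finalSub l = subA l :=
  finalSub_eq_subA_aux l.length l le_rfl

theorem pyRange_two_cons (m : Nat) :
    PySem.List.pyRange 0 ((m : Int) + 2) 2
      = 0 :: (PySem.List.pyRange 0 (m : Int) 2).map (· + 2) := by
  rw [PySem.List.pyRange_of_pos _ _ (by norm_num : (0:Int) < 2),
      PySem.List.pyRange_of_pos _ _ (by norm_num : (0:Int) < 2)]
  have h1 : (if (0:Int) < (m : Int) + 2 then (((m:Int) + 2 - 0 + 2 - 1) / 2).toNat else 0)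
      = (m + 1) / 2 + 1 := by split_ifs with h <;> omega
  have h2 : (if (0:Int) < (m : Int) then (((m:Int) - 0 + 2 - 1) / 2).toNat else 0)
      = (m + 1) / 2 := by split_ifs with h <;> omega
  rw [h1, h2, List.range_succ_eq_map]
  simp only [List.map_cons, List.map_map]
  refine congrArg₂ List.cons (by norm_num) ?_
  apply List.map_congr_left
  intro k _
  simp only [Function.comp]
  push_cast; ring

theorem all_congr_mem {α : Type} (l : List α) (p q : α → Bool)
    (h : ∀ a ∈ l, p a = q a) : l.all p = l.all q := by
  induction l with
  | nil => rfl
  | cons a t ih =>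
    simp only [List.all_cons, h a (by simp), ih (fun x hx => h x (by simp [hx]))]

theorem allP_cons (x y : AEntry) (r : List AEntry) :
    allP (x :: y :: r) = (aCmp (some x) (some y) && allP r) := by
  unfold allP
  simp only [PySem.List.len_eq, List.length_cons]
  have hlen : ((r.length + 1 + 1 : Nat) : Int) = (r.length : Int) + 2 := by push_cast; ring
  rw [hlen, pyRange_two_cons r.length]
  simp only [List.all_cons, List.all_map]
  refine congrArg₂ (fun a b => a && b) ?_ ?_
  · -- the first pair: indices 0 and 1
    have h0 : PySem.List.pyGet? (x :: y :: r) 0 = some x := by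
      simp [PySem.List.pyGet?_zero_cons]
    have h1 : PySem.List.pyGet? (x :: y :: r) (0 + 1) = some y := by
      have : ((0:Int) + 1) = ((1 : Nat) : Int) := by norm_num
      rw [this, PySem.List.pyGet?_natCast]
      rfl
    rw [h0, h1]
  · -- the shifted tail: index i+2 in x::y::r is index i in r
    apply all_congr_mem
    intro i hi
    have hpos : (0:Int) ≤ i := by
      rcases (PySem.List.mem_pyRange_iff_of_pos (by norm_num) i).mp hi with ⟨h, _, _⟩
      exact h
    obtain ⟨k, hk⟩ := Int.eq_ofNat_of_zero_le hpos
    subst hk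
    simp only [Function.comp]
    have e1 : ((k : Int) + 2) = ((k + 2 : Nat) : Int) := by push_cast; ring
    rw [e1]
    have e2 : (((k + 2 : Nat) : Int) + 1) = ((k + 3 : Nat) : Int) := by push_cast; ring
    have e3 : ((k : Int) + 1) = ((k + 1 : Nat) : Int) := by push_cast; ring
    rw [e2, e3, PySem.List.pyGet?_natCast, PySem.List.pyGet?_natCast,
        PySem.List.pyGet?_natCast, PySem.List.pyGet?_natCast]
    simp [List.getElem?_cons_succ]

theorem pairCheck_inr_cons (cs : List Char) (t : List AEntry) :
    pairCheck (Sum.inr cs :: t) = false := by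
  match t with
  | [] => rfl
  | z :: w => simp [pairCheck, aCmp]

theorem allP_spec : ∀ (n : Nat) (sub : List AEntry), sub.length ≤ n →
    (if PySem.Int.mod (PySem.List.len sub) 2 == 0 then allP sub else false) = pairCheck sub := by
  intro n
  induction n with
  | zero =>
    intro sub h
    have : sub = [] := by cases sub <;> simp_all
    subst this; decide
  | succ n ih =>
    intro sub h
    match sub with
    | [] => decide
    | [x] =>
      simp only [PySem.List.len_eq, List.length_cons, List.length_nil]
      norm_num [PySem.Int.mod]
      rfl
    | x :: y :: r =>
      have hcond : (PySem.Int.mod (PySem.List.len (x :: y :: r)) 2 == 0)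
          = (PySem.Int.mod (PySem.List.len r) 2 == 0) := by
        simp only [PySem.List.len_eq, List.length_cons]
        have e1 : ((r.length + 1 + 1 : Nat) : Int) = ((r.length + 2 : Nat) : Int) := by push_cast; ring
        rw [e1]
        have hm : ∀ m : Nat, PySem.Int.mod ((m : Nat) : Int) 2 = ((m % 2 : Nat) : Int) := fun m => by
          exact_mod_cast PySem.Int.mod_natCast m 2
        rw [hm, hm]
        have h2 : (r.length + 2) % 2 = r.length % 2 := by omega
        rw [h2]
      have ihr := ih r (by simp only [List.length_cons] at h; omega)
      rw [hcond]
      by_cases hc : PySem.Int.mod (PySem.List.len r) 2 == 0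
      · simp only [hc, if_true] at ihr ⊢
        rw [allP_cons, ihr]
        rfl
      · simp only [hc] at ihr ⊢
        simp only [Bool.false_eq_true, if_false] at ihr ⊢
        simp [pairCheck, ← ihr]

theorem pairCheck_subA : ∀ (n : Nat) (l : List Char), l.length ≤ n →
    pairCheck (subA l)
      = (match l with
         | [] => false
         | c :: rest => if PySem.Chars.isdigit c then bGo (c :: rest) else false) := by
  intro n
  induction n with
  | zero =>
    intro l hl
    have : l = [] := by cases l <;> simp_all
    subst this; simp [subA, pairCheck]
  | succ n ih =>
    intro l hl
    match l with
    | [] => simp [subA, pairCheck]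
    | c :: rest =>
      show pairCheck (subA (c :: rest))
        = if PySem.Chars.isdigit c = true then bGo (c :: rest) else false
      by_cases hd : PySem.Chars.isdigit c
      · rw [subA, bGo.eq_def]
        simp only [hd, if_true]
        match hrc : (c :: rest).dropWhile PySem.Chars.isdigit with
        | [] => simp [pairCheck]
        | c2 :: r' =>
          simp only [List.isEmpty_cons, Bool.false_eq_true, if_false]
          have hd2 : PySem.Chars.isdigit c2 = false := by
            have := List.head?_dropWhile_not PySem.Chars.isdigit (c :: rest)
            rw [hrc] at this; simpa using this
          -- unfold subA on the non-digit suffix c2 :: r'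
          rw [subA]
          simp only [hd2, Bool.false_eq_true, if_false]
          set cs := (c2 :: r').takeWhile (fun d => !PySem.Chars.isdigit d) with hcs
          set r2 := (c2 :: r').dropWhile (fun d => !PySem.Chars.isdigit d) with hr2
          match hr2c : r2 with
          | [] =>
            simp only [List.isEmpty_nil, if_true]
            simp only [pairCheck, aCmp, Bool.and_true]
            rw [bGo]  -- bGo [] = true
            by_cases he : pvInt ((c :: rest).takeWhile PySem.Chars.isdigit) = (cs.length : Int)
            · simp [he]
            · simp [he, bne_iff_ne, he]
          | c3 :: r3 =>
            simp only [List.isEmpty_cons, Bool.false_eq_true, if_false]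
            have hd3 : PySem.Chars.isdigit c3 = true := by
              have := List.head?_dropWhile_not (fun d => !PySem.Chars.isdigit d) (c2 :: r')
              rw [← hr2] at this; simpa using this
            have hlen : (c3 :: r3).length < (c :: rest).length := by
              have h1 : (c2 :: r').length ≤ rest.length := by
                have := List.length_dropWhile_le PySem.Chars.isdigit rest
                have he : (c :: rest).dropWhile PySem.Chars.isdigit
                    = rest.dropWhile PySem.Chars.isdigit := by
                  simp [List.dropWhile_cons, hd]
                rw [he] at hrc; rw [hrc] at this; exact this
              have h2 := List.length_dropWhile_le (fun d => !PySem.Chars.isdigit d) (c2 :: r')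
              rw [← hr2] at h2
              simp only [List.length_cons] at h1 h2 ⊢
              omega
            have ihr := ih (c3 :: r3) (by
              simp only [List.length_cons] at hl hlen ⊢; omega)
            simp only [hd3, if_true] at ihr
            simp only [pairCheck, aCmp]
            rw [ihr]
            by_cases he : pvInt ((c :: rest).takeWhile PySem.Chars.isdigit) = (cs.length : Int)
            · simp [he]
            · simp [he, bne_iff_ne]
      · -- head non-digit: A's pairing fails immediately, B's guard fails
        rw [subA]
        simp only [hd, Bool.false_eq_true, if_false]
        split
        · simp [pairCheck]
        · rw [pairCheck_inr_cons]

theorem ports_agree (message : String) : is_a_valid_message message = is_a_valid_message_alt message := by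
  rcases h : message.toList.foldl aStep ([], [], []) with ⟨sub0, num, char⟩
  have hfs : finalSub message.toList = sub0 ++ [Sum.inr char] := by
    unfold finalSub; rw [h]
  have hA : (if PySem.Int.mod (PySem.List.len (sub0 ++ [Sum.inr char])) 2 == 0 then
      (PySem.List.pyRange 0 (PySem.List.len (sub0 ++ [Sum.inr char])) 2).all
        (fun i => aCmp (PySem.List.pyGet? (sub0 ++ [Sum.inr char]) i)
          (PySem.List.pyGet? (sub0 ++ [Sum.inr char]) (i + 1)))
    else false) = pairCheck (sub0 ++ [Sum.inr char]) :=
    allP_spec (sub0 ++ [Sum.inr char]).length _ le_rfl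
  unfold is_a_valid_message
  rw [h]
  show (if (PySem.Int.mod (PySem.List.len (sub0 ++ [Sum.inr char])) 2 == 0) = true then
      (PySem.List.pyRange 0 (PySem.List.len (sub0 ++ [Sum.inr char])) 2).all
        (fun i => aCmp (PySem.List.pyGet? (sub0 ++ [Sum.inr char]) i)
          (PySem.List.pyGet? (sub0 ++ [Sum.inr char]) (i + 1)))
    else false) = is_a_valid_message_alt message
  rw [hA, ← hfs, finalSub_eq_subA]
  rw [pairCheck_subA message.toList.length message.toList le_rfl]
  unfold is_a_valid_message_alt
  rfl

-- ===== VERDICT (by name: the statement is the Claim_ definition above) =====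
theorem is_a_valid_message_spec : Claim_equal_is_a_valid_message := by
  intro message _ _
  unfold Spec_is_a_valid_message
  exact ports_agree message
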